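-- pv_equiv track=rewrite | github.com/kabili207/go-reticulum | tests/tools/patch_reticulum_config_ports.py | find_interfaces_section
-- ===== SOURCE A (Python) =====
-- def find_interfaces_section(lines):
--     start = None
--     for i, line in enumerate(lines):
--         if line.strip().lower() == "[interfaces]":
--             start = i
--             break
--     if start is None:
--         return None, None
--     end = len(lines)
--     for j in range(start + 1, len(lines)):
--         s = lines[j].strip()
--         if s.startswith("[") and s.endswith("]") and not s.startswith("[["):
--             end = j
--             break
--     return start, end
-- ===== SOURCE B (Python) =====
-- def find_interfaces_section(lines):
--     # Build, in one full pass, an index of all header-like lines; then answer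
--     # purely from those index lists.
--     iface_idx = []
--     header_idx = []
--     for i, line in enumerate(lines):
--         s = line.strip()
--         if s.lower() == "[interfaces]":
--             iface_idx.append(i)
--         if s.startswith("[") and s.endswith("]") and not s.startswith("[["):
--             header_idx.append(i)
--     if not iface_idx:
--         return None, None
--     start = iface_idx[0]
--     for j in header_idx:
--         if j > start:
--             return start, j
--     return start, len(lines)
-- ===== Notes on version B (the rewrite author's own statement) =====
-- stated objective: alternative
-- what changed: B makes one full pass that builds two index lists (positions of '[interfaces]' lines and positions of section-header lines) and then answers purely from those indices (first interfaces index; first header index greater than it, else len(lines)), instead of A's two early-exit scans over the lines.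
import Mathlib
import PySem

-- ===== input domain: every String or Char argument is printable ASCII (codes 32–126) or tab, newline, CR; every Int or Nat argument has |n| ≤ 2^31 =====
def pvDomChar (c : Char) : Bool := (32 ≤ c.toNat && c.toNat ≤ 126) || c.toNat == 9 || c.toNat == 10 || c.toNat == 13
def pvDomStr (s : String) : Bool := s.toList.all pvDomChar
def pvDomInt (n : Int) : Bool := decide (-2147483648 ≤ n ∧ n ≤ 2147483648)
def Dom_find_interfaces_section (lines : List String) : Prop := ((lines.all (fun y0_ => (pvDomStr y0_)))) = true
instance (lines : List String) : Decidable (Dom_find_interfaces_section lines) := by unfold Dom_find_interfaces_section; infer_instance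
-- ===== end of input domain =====

-- B builds an index of header-like lines in one full pass and answers from it (alternative decomposition; same behaviour).

-- ===== PORT A =====
-- first loop: 'for i, line in enumerate(lines): if line.strip().lower() == "[interfaces]": start = i; break'
def aFindStart : List String → Int → Option Int
  | [], _ => none
  | l :: rest, i =>
    if PySem.Str.lower (PySem.Str.strip l) = "[interfaces]" then some i
    else aFindStart rest (i + 1)

-- second loop: 'for j in range(start+1, len(lines)): s = lines[j].strip(); if …: end = j; break'
-- lines[j] is ported as pyGetD lines j "" (j is always in range here, so this is exact)
def aFindEnd (lines : List String) : List Int → Int → Int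
  | [], dflt => dflt
  | j :: js, dflt =>
    let s := PySem.Str.strip (PySem.List.pyGetD lines j "")
    if PySem.Str.startswith s "[" && PySem.Str.endswith s "]" && !PySem.Str.startswith s "[[" then j
    else aFindEnd lines js dflt

def find_interfaces_section (lines : List String) : Option Int × Option Int :=
  match aFindStart lines 0 with
  | none => (none, none)
  | some start =>
    (some start,
     some (aFindEnd lines (PySem.List.pyRange (start + 1) (lines.length : Int) 1) (lines.length : Int)))

-- ===== PORT B =====
-- the indexing pass: (iface_idx, header_idx) for the lines, first line numbered i
def bIndex : List String → Int → List Int × List Int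
  | [], _ => ([], [])
  | l :: rest, i =>
    let s := PySem.Str.strip l
    let p := bIndex rest (i + 1)
    (if PySem.Str.lower s = "[interfaces]" then i :: p.1 else p.1,
     if PySem.Str.startswith s "[" && PySem.Str.endswith s "]" && !PySem.Str.startswith s "[[" then i :: p.2 else p.2)

-- 'for j in header_idx: if j > start: return start, j'
def bFirstGt (start : Int) : List Int → Option Int
  | [] => none
  | j :: js => if j > start then some j else bFirstGt start js

def find_interfaces_section_alt (lines : List String) : Option Int × Option Int :=
  match bIndex lines 0 with
  | ([], _) => (none, none)
  | (start :: _, hdrs) =>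
    (some start, some ((bFirstGt start hdrs).getD (lines.length : Int)))

-- ===== PRECONDITION & SPEC =====
def Spec_find_interfaces_section (lines : List String) (out : Option Int × Option Int) : Prop := out = find_interfaces_section_alt lines
instance (lines : List String) (out : Option Int × Option Int) : Decidable (Spec_find_interfaces_section lines out) := by unfold Spec_find_interfaces_section; infer_instance

-- ===== CLAIM (what is proved, stated in full; the proofs are below) =====
def Claim_equal_find_interfaces_section : Prop := ∀ (lines : List String), Dom_find_interfaces_section lines → Spec_find_interfaces_section lines (find_interfaces_section lines)

-- ===== LEMMAS AND PROOFS =====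

-- A's second loop as a scan over a suffix of the lines
def endB : List String → Int → Int
  | [], i => i
  | line :: rest, i =>
    let s := PySem.Str.strip line
    if PySem.Str.startswith s "[" && PySem.Str.endswith s "]" && !PySem.Str.startswith s "[[" then i
    else endB rest (i + 1)

theorem aFindEnd_endB (tail : List String) : ∀ (pre : List String),
    aFindEnd (pre ++ tail) (PySem.List.pyRange (pre.length : Int) ((pre ++ tail).length : Int) 1) ((pre ++ tail).length : Int)
      = endB tail (pre.length : Int) := by
  induction tail with
  | nil =>
    intro pre
    rw [PySem.List.pyRange_one_eq_nil (by simp)]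
    simp [aFindEnd, endB]
  | cons l rest ih =>
    intro pre
    rw [PySem.List.pyRange_one_cons (by simp only [List.length_append, List.length_cons]; omega)]
    simp only [aFindEnd, endB]
    have hget : PySem.List.pyGetD (pre ++ l :: rest) (pre.length : Int) "" = l := by
      rw [PySem.List.pyGetD_natCast]
      simp [List.getD]
    rw [hget]
    split
    · rfl
    · have := ih (pre ++ [l])
      simpa using this

-- A's first loop returns the head of B's interfaces index
theorem aFindStart_head (tail : List String) : ∀ i, aFindStart tail i = (bIndex tail i).1.head? := by
  induction tail with
  | nil => intro i; simp [aFindStart, bIndex]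
  | cons l rest ih =>
    intro i
    simp only [aFindStart, bIndex]
    split <;> simp [ih]

-- A's suffix scan returns the head of B's header index of that suffix (default = one past the end)
theorem endB_head (tail : List String) : ∀ i,
    endB tail i = ((bIndex tail i).2.head?).getD (i + (tail.length : Int)) := by
  induction tail with
  | nil => intro i; simp [endB, bIndex]
  | cons l rest ih =>
    intro i
    simp only [endB, bIndex]
    split
    · simp
    · rw [ih]
      rcases ((bIndex rest (i + 1)).2.head?) with _ | j
      · simp only [Option.getD_none, List.length_cons]; push_cast; ring
      · simp

-- the index lists split over append
theorem bIndex_append (xs ys : List String) : ∀ i,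
    bIndex (xs ++ ys) i =
      ((bIndex xs i).1 ++ (bIndex ys (i + (xs.length : Int))).1,
       (bIndex xs i).2 ++ (bIndex ys (i + (xs.length : Int))).2) := by
  induction xs with
  | nil => intro i; simp [bIndex]
  | cons l rest ih =>
    intro i
    have harith : i + 1 + (rest.length : Int) = i + ((l :: rest).length : Int) := by
      simp only [List.length_cons]; push_cast; ring
    simp only [List.cons_append, bIndex, ih, harith, Prod.mk.injEq]
    constructor <;> (split <;> simp)

-- every recorded interfaces index lies in [i, i + length)
theorem bIndex_bounds1 (xs : List String) : ∀ i j, j ∈ (bIndex xs i).1 → i ≤ j ∧ j < i + (xs.length : Int) := by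
  induction xs with
  | nil => intro i j h; simp [bIndex] at h
  | cons l rest ih =>
    intro i j h
    simp only [bIndex] at h
    have key : j = i ∨ j ∈ (bIndex rest (i + 1)).1 := by
      split at h
      · exact List.mem_cons.mp h
      · exact Or.inr h
    have hlen : ((l :: rest).length : Int) = (rest.length : Int) + 1 := by
      simp only [List.length_cons]; push_cast; ring
    rcases key with rfl | hm
    · omega
    · have := ih (i + 1) j hm; omega

-- every recorded header index lies in [i, i + length)
theorem bIndex_bounds2 (xs : List String) : ∀ i j, j ∈ (bIndex xs i).2 → i ≤ j ∧ j < i + (xs.length : Int) := by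
  induction xs with
  | nil => intro i j h; simp [bIndex] at h
  | cons l rest ih =>
    intro i j h
    simp only [bIndex] at h
    have key : j = i ∨ j ∈ (bIndex rest (i + 1)).2 := by
      split at h
      · exact List.mem_cons.mp h
      · exact Or.inr h
    have hlen : ((l :: rest).length : Int) = (rest.length : Int) + 1 := by
      simp only [List.length_cons]; push_cast; ring
    rcases key with rfl | hm
    · omega
    · have := ih (i + 1) j hm; omega

-- scanning B1 ++ B2 for the first index > st skips B1 (all ≤ st) and takes B2's head (all > st)
theorem bFirstGt_split (st : Int) (B1 B2 : List Int)
    (h1 : ∀ b ∈ B1, b ≤ st) (h2 : ∀ b ∈ B2, st < b) :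
    bFirstGt st (B1 ++ B2) = B2.head? := by
  induction B1 with
  | nil =>
    cases B2 with
    | nil => simp [bFirstGt]
    | cons b bs =>
      simp only [List.nil_append, bFirstGt, List.head?]
      rw [if_pos (h2 b (by simp))]
  | cons b bs ih =>
    have hb := h1 b (by simp)
    simp only [List.cons_append, bFirstGt]
    rw [if_neg (not_lt.mpr hb)]
    exact ih (fun x hx => h1 x (by simp [hx]))

-- ===== VERDICT (by name: the statement is the Claim_ definition above) =====
theorem find_interfaces_section_spec : Claim_equal_find_interfaces_section := by
  intro lines _
  unfold Spec_find_interfaces_section find_interfaces_section find_interfaces_section_alt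
  rw [aFindStart_head lines 0]
  rcases hbi : bIndex lines 0 with ⟨ifs, hdrs⟩
  cases ifs with
  | nil => rfl
  | cons st rest =>
    simp only [List.head?]
    have hst : 0 ≤ st ∧ st < (lines.length : Int) := by
      have hmem : st ∈ (bIndex lines 0).1 := by rw [hbi]; simp
      have := bIndex_bounds1 lines 0 st hmem
      omega
    set k : Nat := st.toNat with hk
    have hkst : (k : Int) = st := Int.toNat_of_nonneg hst.1
    have hklt : k + 1 ≤ lines.length := by omega
    have hsplit : lines = lines.take (k + 1) ++ lines.drop (k + 1) := (List.take_append_drop _ _).symm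
    have hlenpre : (lines.take (k + 1)).length = k + 1 := by
      rw [List.length_take]; omega
    -- A's end value
    have hA : aFindEnd lines (PySem.List.pyRange (st + 1) (lines.length : Int) 1) (lines.length : Int)
        = endB (lines.drop (k + 1)) (st + 1) := by
      have := aFindEnd_endB (lines.drop (k + 1)) (lines.take (k + 1))
      rw [← hsplit, hlenpre] at this
      rw [show ((k + 1 : Nat) : Int) = st + 1 by omega] at this
      exact this
    rw [hA, endB_head]
    -- B's header index splits at position k+1
    have hBsplit : hdrs
        = (bIndex (lines.take (k + 1)) 0).2 ++ (bIndex (lines.drop (k + 1)) (st + 1)).2 := by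
      rw [show hdrs = (bIndex lines 0).2 by rw [hbi]]
      conv_lhs => rw [hsplit]
      rw [bIndex_append]
      rw [hlenpre, show (0 : Int) + ((k + 1 : Nat) : Int) = st + 1 by omega]
    rw [hBsplit, bFirstGt_split st _ _
      (fun b hb => by
        have := bIndex_bounds2 (lines.take (k + 1)) 0 b hb
        rw [hlenpre] at this; omega)
      (fun b hb => by
        have := bIndex_bounds2 (lines.drop (k + 1)) (st + 1) b hb
        omega)]
    have hlen : (st + 1) + ((lines.drop (k + 1)).length : Int) = (lines.length : Int) := by
      rw [List.length_drop]; omega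
    rw [hlen]
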